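-- pv_equiv track=rewrite | github.com/relikd/lektor-groupby-plugin | lektor_groupby/util.py | most_used_key
-- ===== SOURCE A (Python) =====
-- from typing import List, Dict, Optional, TypeVar
--
-- T = TypeVar('T')
--
-- def most_used_key(keys: List[T]) -> Optional[T]:
--     ''' Find string with most occurrences. '''
--     if len(keys) < 3:
--         return keys[0] if keys else None  # TODO: first vs last occurrence
--     best_count = 0
--     best_key = None
--     tmp = {}  # type: Dict[T, int]
--     for k in keys:
--         num = (tmp[k] + 1) if k in tmp else 1
--         tmp[k] = num
--         if num > best_count:  # TODO: (>) vs (>=), first vs last occurrence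
--             best_count = num
--             best_key = k
--     return best_key
-- ===== SOURCE B (Python) =====
-- def most_used_key(keys):
--     ''' Find string with most occurrences. '''
--     if not keys:
--         return None
--     counts = {}
--     for k in keys:
--         counts[k] = counts.get(k, 0) + 1
--     m = max(counts.values())
--     run = {}
--     for k in keys:
--         n = run.get(k, 0) + 1
--         if n == m:
--             return k
--         run[k] = n
-- ===== Notes on version B (the rewrite author's own statement) =====
-- stated objective: alternative
-- what changed: A single pass maintaining a running best count/best key is replaced by three separate phases: build a full frequency table, take the maximum count, then a second scan returning the first key whose running count reaches that maximum; the len<3 special branch disappears.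
import Mathlib
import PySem

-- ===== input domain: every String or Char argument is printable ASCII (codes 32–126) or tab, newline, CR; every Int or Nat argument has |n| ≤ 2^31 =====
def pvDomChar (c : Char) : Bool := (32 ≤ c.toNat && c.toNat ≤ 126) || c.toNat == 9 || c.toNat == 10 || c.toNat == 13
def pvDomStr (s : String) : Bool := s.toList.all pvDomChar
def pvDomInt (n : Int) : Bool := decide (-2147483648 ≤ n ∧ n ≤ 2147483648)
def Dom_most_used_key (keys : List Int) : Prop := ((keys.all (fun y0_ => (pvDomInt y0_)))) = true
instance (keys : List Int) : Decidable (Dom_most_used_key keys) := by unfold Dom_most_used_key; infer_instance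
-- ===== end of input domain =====

-- B replaces A's single running-best pass by a count/max/rescan decomposition (alternative structure, same cost).

-- ===== PORT A =====
def aStep (s : Int × Option Int × PySem.Dict Int Int) (k : Int) : Int × Option Int × PySem.Dict Int Int :=
  let num := if s.2.2.contains k then s.2.2.getD k 0 + 1 else 1
  let tmp' := s.2.2.insert k num
  if num > s.1 then (num, some k, tmp') else (s.1, s.2.1, tmp')

def most_used_key (keys : List Int) : Option Int :=
  if keys.length < 3 then
    (match keys with
     | [] => none
     | x :: _ => some x)
  else
    (keys.foldl aStep (0, none, PySem.Dict.empty)).2.1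

-- ===== PORT B =====
-- second pass of Source B: first key whose running count reaches m (early return)
def altScan (m : Int) : PySem.Dict Int Int → List Int → Option Int
  | _, [] => none
  | run, k :: t =>
      if run.getD k 0 + 1 = m then some k
      else altScan m (run.insert k (run.getD k 0 + 1)) t

def most_used_key_alt (keys : List Int) : Option Int :=
  if keys = [] then none
  else
    let counts := keys.foldl (fun d k => d.insert k (d.getD k 0 + 1)) PySem.Dict.empty
    match PySem.List.max? counts.values (fun v => v) with
    | none => none
    | some m => altScan m PySem.Dict.empty keys

-- ===== PRECONDITION & SPEC =====
def Spec_most_used_key (keys : List Int) (out : Option Int) : Prop := out = most_used_key_alt keys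
instance (keys : List Int) (out : Option Int) : Decidable (Spec_most_used_key keys out) := by unfold Spec_most_used_key; infer_instance

-- ===== CLAIM (what is proved, stated in full; the proofs are below) =====
def Claim_equal_most_used_key : Prop := ∀ (keys : List Int), Dom_most_used_key keys → Spec_most_used_key keys (most_used_key keys)

-- ===== LEMMAS AND PROOFS =====

lemma altScan_append (p : List Int) (m : Int) (l : List Int) (run : PySem.Dict Int Int) :
    altScan m run (p ++ l) =
      (match altScan m run p with
       | some j => some j
       | none => altScan m (p.foldl (fun d x => d.insert x (d.getD x 0 + 1)) run) l) := by
  induction p generalizing run with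
  | nil => simp [altScan]
  | cons k t ih =>
      simp only [List.cons_append, altScan, List.foldl_cons]
      by_cases h : run.getD k 0 + 1 = m
      · simp [h]
      · simp [h, ih]

lemma altScan_eq_none (p : List Int) (m : Int) (run : PySem.Dict Int Int)
    (h : ∀ x ∈ p, run.getD x 0 + (p.count x : Int) < m) : altScan m run p = none := by
  induction p generalizing run with
  | nil => rfl
  | cons k t ih =>
      have hk := h k (List.mem_cons_self ..)
      have hkc : ((k :: t).count k : Int) = (t.count k : Int) + 1 := by
        simp [List.count_cons]
      simp only [altScan]
      rw [if_neg (by omega)]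
      apply ih
      intro x hx
      rw [PySem.Dict.getD_insert]
      by_cases hxk : x = k
      · subst hxk
        simp only [if_pos rfl]
        omega
      · rw [if_neg hxk]
        have hxm := h x (List.mem_cons_of_mem _ hx)
        have hkx : ¬k = x := fun h => hxk h.symm
        have : ((k :: t).count x : Int) = (t.count x : Int) := by
          simp [List.count_cons, hkx]
        omega

lemma altScan_isSome (p : List Int) (m : Int) (run : PySem.Dict Int Int)
    (h : ∃ x, run.getD x 0 < m ∧ m ≤ run.getD x 0 + (p.count x : Int)) :
    (altScan m run p).isSome := by
  induction p generalizing run with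
  | nil =>
      obtain ⟨x, h1, h2⟩ := h
      simp at h2
      omega
  | cons k t ih =>
      simp only [altScan]
      by_cases hm : run.getD k 0 + 1 = m
      · simp [hm]
      · rw [if_neg hm]
        apply ih
        obtain ⟨x, h1, h2⟩ := h
        by_cases hxk : x = k
        · subst hxk
          refine ⟨x, ?_, ?_⟩ <;> rw [PySem.Dict.getD_insert, if_pos rfl]
          · omega
          · have : ((x :: t).count x : Int) = (t.count x : Int) + 1 := by
              simp [List.count_cons]
            omega
        · have hkx : ¬k = x := fun h => hxk h.symm
          refine ⟨x, ?_, ?_⟩ <;> rw [PySem.Dict.getD_insert, if_neg hxk]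
          · exact h1
          · have : ((k :: t).count x : Int) = (t.count x : Int) := by
              simp [List.count_cons, hkx]
            omega

lemma count_append_singleton (p : List Int) (k x : Int) :
    ((p ++ [k]).count x : Int) = (p.count x : Int) + (if x = k then 1 else 0) := by
  by_cases h : x = k
  · simp [List.count_append, List.count_singleton, h]
  · have h2 : ¬k = x := fun e => h e.symm
    simp [List.count_append, List.count_singleton, h, h2]

lemma alt_of_ne_nil (p : List Int) (hp : p ≠ []) (m : Int)
    (hub : ∀ x ∈ p, (p.count x : Int) ≤ m)
    (hex : ∃ x ∈ p, (p.count x : Int) = m) :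
    most_used_key_alt p = altScan m PySem.Dict.empty p := by
  simp only [most_used_key_alt, if_neg hp]
  rw [PySem.Dict.foldl_insert_getD_add_one_eq_counter]
  have hv : (PySem.Dict.counter p).values
      = (PySem.Set.ofList p).map (fun k => ((p.count k : Nat) : Int)) := by
    simp only [PySem.Dict.values, PySem.Dict.items_counter, List.map_map]
    rfl
  obtain ⟨y, hyp, hyc⟩ := hex
  have hymem : ((p.count y : Nat) : Int) ∈ (PySem.Dict.counter p).values := by
    rw [hv]
    exact List.mem_map_of_mem ((PySem.Set.mem_ofList p y).mpr hyp)
  cases hmax : PySem.List.max? (PySem.Dict.counter p).values (fun v => v) with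
  | none =>
      rw [PySem.List.max?_eq_none_iff] at hmax
      rw [hmax] at hymem
      exact absurd hymem (List.not_mem_nil)
  | some m' =>
      have hm'le : m' ≤ m := by
        have := PySem.List.max?_mem hmax
        rw [hv] at this
        obtain ⟨k, hk, hkeq⟩ := List.mem_map.mp this
        have := hub k ((PySem.Set.mem_ofList p k).mp hk)
        omega
      have hlem' : m ≤ m' := by
        have := PySem.List.max?_isMax hmax _ hymem
        omega
      have : m' = m := le_antisymm hm'le hlem'
      rw [this]

lemma loopA (rest : List Int) : ∀ (p : List Int) (bc : Int) (bk : Option Int)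
    (tmp : PySem.Dict Int Int),
    (∀ x, tmp.getD x 0 = (p.count x : Int)) →
    (∀ x, tmp.contains x = decide (x ∈ p)) →
    (∀ x, (p.count x : Int) ≤ bc) →
    (bc ≠ 0 → ∃ x ∈ p, (p.count x : Int) = bc) →
    (p ≠ [] → 1 ≤ bc) →
    bk = altScan bc PySem.Dict.empty p →
    (rest.foldl aStep (bc, bk, tmp)).2.1 = most_used_key_alt (p ++ rest) := by
  induction rest with
  | nil =>
      intro p bc bk tmp htmp hcont hub hex hpos hbk
      simp only [List.foldl_nil, List.append_nil]
      by_cases hp : p = []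
      · subst hp
        simpa [altScan, most_used_key_alt] using hbk
      · have h1 : 1 ≤ bc := hpos hp
        rw [alt_of_ne_nil p hp bc (fun x _ => hub x) (hex (by omega))]
        exact hbk
  | cons k rest' ih =>
      intro p bc bk tmp htmp hcont hub hex hpos hbk
      have hnum : (if tmp.contains k then tmp.getD k 0 + 1 else 1) = (p.count k : Int) + 1 := by
        by_cases hk : k ∈ p
        · rw [hcont k, if_pos (by simpa using hk), htmp k]
        · rw [hcont k, if_neg (by simpa using hk)]
          have : p.count k = 0 := List.count_eq_zero.mpr hk
          omega
      have happ : p ++ k :: rest' = (p ++ [k]) ++ rest' := by simp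
      rw [List.foldl_cons, happ]
      simp only [aStep, hnum]
      have htmp' : ∀ x, (tmp.insert k ((p.count k : Int) + 1)).getD x 0 = (((p ++ [k]).count x : Nat) : Int) := by
        intro x
        rw [PySem.Dict.getD_insert, count_append_singleton]
        by_cases hxk : x = k
        · rw [if_pos hxk, if_pos hxk, hxk]
        · rw [if_neg hxk, if_neg hxk, htmp x]
          omega
      have hcont' : ∀ x, (tmp.insert k ((p.count k : Int) + 1)).contains x = decide (x ∈ p ++ [k]) := by
        intro x
        rw [PySem.Dict.contains_insert, hcont x]
        by_cases hxk : x = k <;> simp [hxk]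
      by_cases hgt : (p.count k : Int) + 1 > bc
      · rw [if_pos hgt]
        apply ih (p ++ [k]) _ _ _ htmp' hcont'
        · intro x
          rw [count_append_singleton]
          by_cases hxk : x = k
          · rw [if_pos hxk, hxk]
          · rw [if_neg hxk]
            have := hub x
            omega
        · intro _
          refine ⟨k, by simp, ?_⟩
          rw [count_append_singleton, if_pos rfl]
        · intro _
          have : (0:Int) ≤ (p.count k : Int) := Int.natCast_nonneg _
          omega
        · rw [altScan_append]
          have hnone : altScan ((p.count k : Int) + 1) PySem.Dict.empty p = none := by
            apply altScan_eq_none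
            intro x hx
            rw [PySem.Dict.getD_empty]
            have := hub x
            omega
          rw [hnone]
          simp only [altScan]
          rw [PySem.Dict.getD_foldl_insert_add_one, PySem.Dict.getD_empty, if_pos (by omega)]
      · rw [if_neg hgt]
        have hbc1 : 1 ≤ bc := by
          have : (0:Int) ≤ (p.count k : Int) := Int.natCast_nonneg _
          omega
        obtain ⟨y, hyp, hyc⟩ := hex (by omega)
        have hyk : y ≠ k := by
          intro he
          rw [he] at hyc
          omega
        apply ih (p ++ [k]) _ _ _ htmp' hcont'
        · intro x
          rw [count_append_singleton]
          by_cases hxk : x = k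
          · rw [if_pos hxk, hxk]
            omega
          · rw [if_neg hxk]
            have := hub x
            omega
        · intro _
          refine ⟨y, by simp [hyp], ?_⟩
          rw [count_append_singleton, if_neg hyk]
          omega
        · intro _
          exact hbc1
        · rw [altScan_append]
          have hsome : (altScan bc PySem.Dict.empty p).isSome := by
            apply altScan_isSome
            exact ⟨y, by rw [PySem.Dict.getD_empty]; omega,
                       by rw [PySem.Dict.getD_empty]; omega⟩
          cases hcase : altScan bc PySem.Dict.empty p with
          | none => rw [hcase] at hsome; simp at hsome
          | some j => rw [hcase] at hbk; simpa using hbk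

-- the three short lists A's len<3 branch handles agree with B
lemma alt_short (a : Int) (t : List Int) (ht : t = [] ∨ ∃ b, t = [b]) :
    most_used_key_alt (a :: t) = some a := by
  rcases ht with h | ⟨b, h⟩ <;> subst h
  · rw [alt_of_ne_nil [a] (by simp) 1 ?_ ?_]
    · simp [altScan]
    · intro x hx
      simp only [List.mem_singleton] at hx
      subst hx
      simp
    · exact ⟨a, by simp, by simp⟩
  · by_cases hba : a = b
    · subst hba
      rw [alt_of_ne_nil [a, a] (by simp) 2 ?_ ?_]
      · simp [altScan, PySem.Dict.getD_insert, PySem.Dict.getD_empty]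
      · intro x hx
        simp only [List.mem_cons, List.not_mem_nil, or_false] at hx
        rcases hx with hx | hx <;> · subst hx; simp [List.count_cons]
      · exact ⟨a, by simp, by simp [List.count_cons]⟩
    · have hba2 : ¬b = a := fun e => hba e.symm
      rw [alt_of_ne_nil [a, b] (by simp) 1 ?_ ?_]
      · simp [altScan]
      · intro x hx
        simp only [List.mem_cons, List.not_mem_nil, or_false] at hx
        rcases hx with hx | hx <;> · subst hx; simp [List.count_cons, hba, hba2]
      · exact ⟨a, by simp, by simp [List.count_cons, hba]⟩

-- ===== VERDICT (by name: the statement is the Claim_ definition above) =====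
theorem most_used_key_spec : Claim_equal_most_used_key := by
  unfold Claim_equal_most_used_key Spec_most_used_key
  intro keys _
  by_cases hlen : keys.length < 3
  · rcases keys with _ | ⟨a, _ | ⟨b, _ | ⟨c, t⟩⟩⟩
    · rfl
    · rw [show most_used_key [a] = some a from rfl]
      exact (alt_short a [] (Or.inl rfl)).symm
    · rw [show most_used_key [a, b] = some a from rfl]
      exact (alt_short a [b] (Or.inr ⟨b, rfl⟩)).symm
    · exfalso
      simp only [List.length_cons] at hlen
      omega
  · rw [show most_used_key keys = (keys.foldl aStep (0, none, PySem.Dict.empty)).2.1 from by rw [most_used_key.eq_def, if_neg hlen]]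
    rw [show keys = [] ++ keys from rfl]
    apply loopA keys [] 0 none PySem.Dict.empty
    · intro x; simp [PySem.Dict.getD_empty]
    · intro x; simp [PySem.Dict.contains_empty]
    · intro x; simp
    · intro h; omega
    · intro h; simp at h
    · rfl
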